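-- pv_equiv track=rewrite | github.com/woohree/ALGO2ITHM_STUDY | baekjoon/2월/0221/s3_1639_행운의티켓/woohree.py | longest_lucky_number
-- ===== SOURCE A (Python) =====
-- def longest_lucky_number(ticket):
--     length = len(ticket)
--
--     if length % 2 == 0:  # 길이가 짝수
--         # 가장 긴 길이의 행운 티켓 번호부터 체크
--         for l in range(length, 1, -2):
--             for idx in range(length - l + 1):
--                 # 행운의 티켓 길이의 절반을 각각 더해 비교하고 같다면 종료!
--                 if my_sum(ticket[idx:idx+(l//2)]) == my_sum(ticket[idx+(l//2):idx+l]):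
--                     return l
--     else:  # 홀수
--         # 가장 긴 길이의 행운 티켓 번호는 전체 길이 - 1
--         for l in range(length-1, 1, -2):
--             for idx in range(length - l + 1):
--                 if my_sum(ticket[idx:idx+(l//2)]) == my_sum(ticket[idx+(l//2):idx+l]):
--                     return l
--     return 0
--
-- def my_sum(numbers):
--     ssum = 0
--     for n in numbers:
--         ssum += n
--     return ssum
-- ===== SOURCE B (Python) =====
-- def longest_lucky_number(ticket):
--     # Center expansion with running half-sums: O(n^2) instead of A's O(n^3) window rescans.
--     n = len(ticket)
--     best = 0
--     for mid in range(1, n):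
--         ls = 0
--         rs = 0
--         for k in range(1, min(mid, n - mid) + 1):
--             ls += ticket[mid - k]
--             rs += ticket[mid + k - 1]
--             if ls == rs and 2 * k > best:
--                 best = 2 * k
--     return best
-- ===== Notes on version B (the rewrite author's own statement) =====
-- stated objective: faster
-- what changed: B replaces A's scan of every even window with a freshly recomputed half-sum per window (O(n^3)) by a center-expansion that grows each window around its midpoint while maintaining the two half-sums incrementally, taking the max matching length in one O(n^2) double loop.
import Mathlib
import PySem

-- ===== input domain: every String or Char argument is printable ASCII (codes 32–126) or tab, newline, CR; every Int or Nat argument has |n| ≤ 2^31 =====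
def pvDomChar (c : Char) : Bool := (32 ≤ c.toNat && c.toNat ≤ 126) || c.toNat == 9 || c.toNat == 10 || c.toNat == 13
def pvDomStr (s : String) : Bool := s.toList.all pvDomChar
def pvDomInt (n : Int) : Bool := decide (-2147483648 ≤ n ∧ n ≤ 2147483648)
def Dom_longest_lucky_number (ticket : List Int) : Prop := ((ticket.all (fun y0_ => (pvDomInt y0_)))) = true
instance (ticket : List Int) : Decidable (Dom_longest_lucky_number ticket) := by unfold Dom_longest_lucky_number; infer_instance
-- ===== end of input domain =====

-- B replaces A's O(n^3) rescan of every even window by an O(n^2) center expansion with running half-sums (objective: faster worst case).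

-- ===== PORT A =====
def mySum (numbers : List Int) : Int := numbers.foldl (fun ssum n => ssum + n) 0

-- the window test from A's inner `if`
def condA (t : List Int) (l idx : Int) : Bool :=
  mySum (PySem.List.slice t (some idx) (some (idx + PySem.Int.floordiv l 2))) ==
  mySum (PySem.List.slice t (some (idx + PySem.Int.floordiv l 2)) (some (idx + l)))

-- A's inner `for idx` loop with its early `return l`
def searchIdx (t : List Int) (l : Int) : List Int → Option Int
  | [] => none
  | idx :: rest => if condA t l idx then some l else searchIdx t l rest

-- A's outer `for l` loop
def searchL (t : List Int) (length : Int) : List Int → Int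
  | [] => 0
  | l :: rest =>
    match searchIdx t l (PySem.List.pyRange 0 (length - l + 1) 1) with
    | some v => v
    | none => searchL t length rest

def longest_lucky_number (ticket : List Int) : Int :=
  let length : Int := ticket.length
  if PySem.Int.mod length 2 == 0 then
    searchL ticket length (PySem.List.pyRange length 1 (-2))
  else
    searchL ticket length (PySem.List.pyRange (length - 1) 1 (-2))

-- ===== PORT B =====
-- B's inner `for k` loop: running half-sums ls/rs around the center `mid`
def innerB (t : List Int) (mid : Int) : List Int → Int → Int → Int → Int
  | [], _, _, best => best
  | k :: rest, ls, rs, best =>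
    let ls' := ls + PySem.List.pyGetD t (mid - k) 0
    let rs' := rs + PySem.List.pyGetD t (mid + k - 1) 0
    let best' := if ls' == rs' ∧ 2 * k > best then 2 * k else best
    innerB t mid rest ls' rs' best'

-- B's outer `for mid` loop
def outerB (t : List Int) (n : Int) : List Int → Int → Int
  | [], best => best
  | mid :: rest, best =>
    outerB t n rest
      (innerB t mid (PySem.List.pyRange 1 (min mid (n - mid) + 1) 1) 0 0 best)

def longest_lucky_number_alt (ticket : List Int) : Int :=
  let n : Int := ticket.length
  outerB ticket n (PySem.List.pyRange 1 n 1) 0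

-- ===== PRECONDITION & SPEC =====
def Spec_longest_lucky_number (ticket : List Int) (out : Int) : Prop := out = longest_lucky_number_alt ticket
instance (ticket : List Int) (out : Int) : Decidable (Spec_longest_lucky_number ticket out) := by unfold Spec_longest_lucky_number; infer_instance

-- ===== CLAIM (what is proved, stated in full; the proofs are below) =====
def Claim_equal_longest_lucky_number : Prop := ∀ (ticket : List Int), Dom_longest_lucky_number ticket → Spec_longest_lucky_number ticket (longest_lucky_number ticket)

-- ===== LEMMAS AND PROOFS =====

-- sum of the window t[a:a+k]
def seg (t : List Int) (a k : Nat) : Int := ((t.drop a).take k).sum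

-- the window [i, i+2k) has equal half sums
def okw (t : List Int) (i k : Nat) : Prop := seg t i k = seg t (i + k) k

-- the set of achievable lucky lengths
def LuckyS (t : List Int) (m : Int) : Prop :=
  ∃ k i : Nat, m = 2 * (k : Int) ∧ 1 ≤ k ∧ i + 2 * k ≤ t.length ∧ okw t i k

-- both programs return the greatest element of LuckyS, or 0; that characterisation is unique
theorem lucky_uniq (t : List Int) (R1 R2 : Int)
    (h1 : (R1 = 0 ∨ LuckyS t R1) ∧ ∀ m, LuckyS t m → m ≤ R1)
    (h2 : (R2 = 0 ∨ LuckyS t R2) ∧ ∀ m, LuckyS t m → m ≤ R2) : R1 = R2 := by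
  obtain ⟨m1, u1⟩ := h1
  obtain ⟨m2, u2⟩ := h2
  rcases m1 with h10 | h1S <;> rcases m2 with h20 | h2S
  · omega
  · exfalso; have := u1 _ h2S; obtain ⟨k, i, hk, hk1, _, _⟩ := h2S; omega
  · exfalso; have := u2 _ h1S; obtain ⟨k, i, hk, hk1, _, _⟩ := h1S; omega
  · exact le_antisymm (u2 _ h1S) (u1 _ h2S)

theorem mySum_eq (xs : List Int) : mySum xs = xs.sum := by
  unfold mySum
  rw [PySem.List.foldl_add (g := fun x => x)]
  simp

theorem seg_zero (t : List Int) (a : Nat) : seg t a 0 = 0 := by simp [seg]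

theorem seg_succ_front (t : List Int) (a k : Nat) (h : a < t.length) :
    seg t a (k + 1) = t.getD a 0 + seg t (a + 1) k := by
  unfold seg
  rw [List.getD_eq_getElem _ _ h]
  rw [List.drop_eq_getElem_cons h, List.take_succ_cons, List.sum_cons]

theorem seg_succ_back (t : List Int) (a k : Nat) (h : a + k < t.length) :
    seg t a (k + 1) = seg t a k + t.getD (a + k) 0 := by
  unfold seg
  rw [List.take_add_one, List.sum_append, List.getD_eq_getElem _ _ h]
  have : (t.drop a)[k]? = some t[a + k] := by
    rw [List.getElem?_drop]
    exact List.getElem?_eq_getElem (by omega)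
  simp [this]

-- ---- pyRange with step -2, counting down to 1 ----

theorem pyRangeN2_nil (a : Int) (h : a ≤ 1) : PySem.List.pyRange a 1 (-2) = [] := by
  simp [PySem.List.pyRange]
  omega

theorem pyRangeN2_unfold (b : Int) (hb : 1 < b) :
    PySem.List.pyRange b 1 (-2) =
      (List.range ((b / 2).toNat)).map (fun k : Nat => b + -2 * (k : Int)) := by
  simp only [PySem.List.pyRange, if_neg (by norm_num : ¬(-2:Int) = 0),
    if_neg (by norm_num : ¬(0:Int) < -2), if_pos hb]
  congr 2
  norm_num
  omega

theorem pyRangeN2_cons (a : Int) (h : 1 < a) :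
    PySem.List.pyRange a 1 (-2) = a :: PySem.List.pyRange (a - 2) 1 (-2) := by
  by_cases h2 : 1 < a - 2
  · rw [pyRangeN2_unfold a h, pyRangeN2_unfold _ h2]
    have e : (a - 2) / 2 = a / 2 - 1 := by
      have e1 : a - 2 = a + (-1) * 2 := by ring
      rw [e1, Int.add_mul_ediv_right _ _ (by norm_num : (2:Int) ≠ 0)]
      ring
    have h1 : 2 ≤ a / 2 := by
      have := Int.ediv_le_ediv (by norm_num : (0:Int) < 2) (show (4:Int) ≤ a by omega)
      simpa using this
    have hm : (a / 2).toNat = ((a - 2) / 2).toNat + 1 := by omega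
    rw [hm, List.range_succ_eq_map, List.map_cons, List.map_map]
    congr 1
    · norm_num
    · apply List.map_congr_left
      intro x _
      simp only [Function.comp_apply]
      push_cast
      ring
  · have : a = 2 ∨ a = 3 := by omega
    rcases this with rfl | rfl <;> decide

theorem mem_pyRangeN2 (N : Nat) : ∀ (a x : Int), a.toNat ≤ N →
    (x ∈ PySem.List.pyRange a 1 (-2) ↔ 1 < x ∧ x ≤ a ∧ (2 ∣ a - x)) := by
  induction N with
  | zero =>
    intro a x ha
    rw [pyRangeN2_nil a (by omega)]
    simp; omega
  | succ n ih =>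
    intro a x ha
    by_cases h : 1 < a
    · rw [pyRangeN2_cons a h, List.mem_cons, ih (a - 2) x (by omega)]
      constructor
      · rintro (rfl | ⟨h1, h2, h3⟩)
        · exact ⟨h, le_refl _, by omega⟩
        · exact ⟨h1, by omega, by omega⟩
      · rintro ⟨h1, h2, h3⟩
        by_cases hx : x = a
        · exact Or.inl hx
        · exact Or.inr ⟨h1, by omega, by omega⟩
    · rw [pyRangeN2_nil a (by omega)]
      simp; omega

theorem pairwise_pyRangeN2 (N : Nat) : ∀ (a : Int), a.toNat ≤ N →
    (PySem.List.pyRange a 1 (-2)).Pairwise (· > ·) := by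
  induction N with
  | zero =>
    intro a ha
    rw [pyRangeN2_nil a (by omega)]
    exact List.Pairwise.nil
  | succ n ih =>
    intro a ha
    by_cases h : 1 < a
    · rw [pyRangeN2_cons a h]
      refine List.Pairwise.cons ?_ (ih (a - 2) (by omega))
      intro x hx
      have := (mem_pyRangeN2 n (a - 2) x (by omega)).1 hx
      omega
    · rw [pyRangeN2_nil a (by omega)]
      exact List.Pairwise.nil

-- find? on a strictly descending list returns the greatest match
theorem find?_desc_max (p : Int → Bool) : ∀ (ls : List Int), ls.Pairwise (· > ·) →
    ∀ l, ls.find? p = some l → ∀ x ∈ ls, p x → x ≤ l := by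
  intro ls hp l hfind x hx hpx
  induction ls with
  | nil => simp at hx
  | cons y ys ih =>
    rw [List.find?_cons] at hfind
    rcases List.mem_cons.1 hx with rfl | hx'
    · rw [hpx] at hfind
      simp at hfind
      omega
    · by_cases hy : p y
      · rw [hy] at hfind; simp at hfind
        have := (List.pairwise_cons.1 hp).1 x hx'
        omega
      · rw [Bool.not_eq_true] at hy
        rw [hy] at hfind; simp at hfind
        exact ih (List.pairwise_cons.1 hp).2 hfind hx'


-- ---- A-side characterisation ----

theorem floordiv_two_natCast (k : Nat) : PySem.Int.floordiv (2 * (k:Int)) 2 = (k:Int) := by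
  rw [PySem.Int.floordiv_eq_ediv_of_pos (by norm_num : (0:Int) < 2)]
  omega

theorem condA_iff (t : List Int) (k i : Nat) :
    condA t (2 * (k:Int)) (i:Int) = true ↔ okw t i k := by
  unfold condA
  rw [floordiv_two_natCast]
  have e1 : PySem.List.slice t (some (i:Int)) (some ((i:Int) + (k:Int))) = (t.drop i).take k :=
    PySem.List.slice_natCast_add t i k
  have h3 : (i:Int) + (k:Int) = ((i + k : Nat) : Int) := by push_cast; ring
  have h4 : (i:Int) + 2 * (k:Int) = ((i + k : Nat) : Int) + (k : Int) := by push_cast; ring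
  rw [e1, h4, h3, PySem.List.slice_natCast_add, mySum_eq, mySum_eq]
  simp [okw, seg]

-- A's inner loop returns `some l` iff some index passes the test
theorem searchIdx_eq (t : List Int) (l : Int) : ∀ idxs : List Int,
    searchIdx t l idxs = if idxs.any (fun idx => condA t l idx) then some l else none := by
  intro idxs
  induction idxs with
  | nil => rfl
  | cons idx rest ih =>
    rw [searchIdx, List.any_cons, ih]
    by_cases h : condA t l idx = true <;> simp [h]

-- the predicate A's outer loop tests for each candidate length l
def PA (t : List Int) (l : Int) : Bool :=
  (PySem.List.pyRange 0 ((t.length:Int) - l + 1) 1).any (fun idx => condA t l idx)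

theorem searchL_eq (t : List Int) : ∀ ls : List Int,
    searchL t (t.length:Int) ls = ((ls.find? (PA t)).getD 0) := by
  intro ls
  induction ls with
  | nil => rfl
  | cons l rest ih =>
    rw [searchL, searchIdx_eq, List.find?_cons]
    by_cases h : PA t l = true
    · rw [if_pos (by unfold PA at h; exact h), h]; rfl
    · rw [if_neg (by unfold PA at h; exact h)]
      rw [Bool.not_eq_true] at h
      rw [h, ih]

theorem PA_iff (t : List Int) (k : Nat) :
    PA t (2 * (k:Int)) = true ↔ ∃ i : Nat, i + 2 * k ≤ t.length ∧ okw t i k := by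
  unfold PA
  rw [List.any_eq_true]
  constructor
  · rintro ⟨idx, hmem, hc⟩
    rw [PySem.List.mem_pyRange_one] at hmem
    obtain ⟨h0, hlt⟩ := hmem
    lift idx to Nat using h0 with i
    rw [condA_iff] at hc
    refine ⟨i, by omega, hc⟩
  · rintro ⟨i, hle, hok⟩
    refine ⟨(i:Int), ?_, (condA_iff t k i).2 hok⟩
    rw [PySem.List.mem_pyRange_one]
    omega

theorem charA_gen (t : List Int) (E : Int) (hE : 2 ∣ E) (hEn : E ≤ (t.length:Int))
    (hEmax : (t.length:Int) ≤ E + 1) :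
    (searchL t (t.length:Int) (PySem.List.pyRange E 1 (-2)) = 0 ∨
      LuckyS t (searchL t (t.length:Int) (PySem.List.pyRange E 1 (-2)))) ∧
    ∀ m, LuckyS t m → m ≤ searchL t (t.length:Int) (PySem.List.pyRange E 1 (-2)) := by
  have hmem : ∀ x, x ∈ PySem.List.pyRange E 1 (-2) ↔ 1 < x ∧ x ≤ E ∧ (2 ∣ E - x) :=
    fun x => mem_pyRangeN2 E.toNat E x le_rfl
  have hpw := pairwise_pyRangeN2 E.toNat E le_rfl
  rw [searchL_eq]
  constructor
  · cases hfind : (PySem.List.pyRange E 1 (-2)).find? (PA t) with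
    | none => left; rfl
    | some l =>
      right
      have hPl : PA t l = true := List.find?_some hfind
      have hlmem := (hmem l).1 (List.mem_of_find?_eq_some hfind)
      obtain ⟨c, hc⟩ : (2:Int) ∣ l := by omega
      have hc0 : 0 ≤ c := by omega
      have hl : l = 2 * ((c.toNat : Nat) : Int) := by omega
      rw [hl] at hPl
      obtain ⟨i, hwin, hok⟩ := (PA_iff t c.toNat).1 hPl
      refine ⟨c.toNat, i, by simp; omega, by omega, hwin, hok⟩
  · intro m hm
    obtain ⟨k, i, rfl, hk1, hwin, hok⟩ := hm
    have hPm : PA t (2 * (k:Int)) = true := (PA_iff t k).2 ⟨i, hwin, hok⟩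
    have h2kn : 2 * (k:Int) ≤ (t.length:Int) := by omega
    have hmmem : (2 * (k:Int)) ∈ PySem.List.pyRange E 1 (-2) := by
      rw [hmem]
      refine ⟨by omega, by omega, by omega⟩
    cases hfind : (PySem.List.pyRange E 1 (-2)).find? (PA t) with
    | none =>
      exfalso
      exact absurd hPm (by simpa using (List.find?_eq_none.1 hfind _ hmmem))
    | some l =>
      have := find?_desc_max (PA t) _ hpw l hfind _ hmmem hPm
      simpa using this

theorem charA (t : List Int) :
    (longest_lucky_number t = 0 ∨ LuckyS t (longest_lucky_number t)) ∧
    ∀ m, LuckyS t m → m ≤ longest_lucky_number t := by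
  unfold longest_lucky_number
  simp only [beq_iff_eq]
  split
  · next hmod =>
    have hdvd : (2:Int) ∣ (t.length:Int) := (PySem.Int.mod_eq_zero_iff_dvd _ _).1 hmod
    exact charA_gen t _ hdvd le_rfl (by omega)
  · next hmod =>
    have hdvd : ¬ (2:Int) ∣ (t.length:Int) := by
      intro hd
      exact hmod ((PySem.Int.mod_eq_zero_iff_dvd _ _).2 hd)
    exact charA_gen t _ (by omega) (by omega) (by omega)

-- ---- B-side characterisation ----

theorem innerB_inv (t : List Int) (mid : Nat) :
    ∀ (d k0 : Nat) (best : Int),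
    k0 + d ≤ mid → mid + (k0 + d) ≤ t.length →
    (best ≤ innerB t (mid:Int) (PySem.List.pyRange ((k0:Int)+1) ((k0:Int)+(d:Int)+1) 1)
        (seg t (mid - k0) k0) (seg t mid k0) best ∧
     (∀ k : Nat, k0 < k → k ≤ k0 + d → okw t (mid - k) k →
        2*(k:Int) ≤ innerB t (mid:Int) (PySem.List.pyRange ((k0:Int)+1) ((k0:Int)+(d:Int)+1) 1)
          (seg t (mid - k0) k0) (seg t mid k0) best) ∧
     (innerB t (mid:Int) (PySem.List.pyRange ((k0:Int)+1) ((k0:Int)+(d:Int)+1) 1)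
          (seg t (mid - k0) k0) (seg t mid k0) best = best ∨
      ∃ k : Nat, k0 < k ∧ k ≤ k0 + d ∧ okw t (mid - k) k ∧
        innerB t (mid:Int) (PySem.List.pyRange ((k0:Int)+1) ((k0:Int)+(d:Int)+1) 1)
          (seg t (mid - k0) k0) (seg t mid k0) best = 2*(k:Int))) := by
  intro d
  induction d with
  | zero =>
    intro k0 best h1 h2
    rw [show ((k0:Int)+(0:Nat)+1 : Int) = (k0:Int)+1 by push_cast; ring,
      PySem.List.pyRange_one_eq_nil (le_refl _)]
    exact ⟨le_rfl, fun k hk1 hk2 _ => absurd hk2 (by omega), Or.inl rfl⟩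
  | succ d ih =>
    intro k0 best h1 h2
    rw [PySem.List.pyRange_one_cons (by omega), innerB]
    have hget1 : PySem.List.pyGetD t ((mid:Int) - ((k0:Int)+1)) 0 = t.getD (mid - (k0+1)) 0 := by
      rw [show (mid:Int) - ((k0:Int)+1) = ((mid - (k0+1) : Nat) : Int) by omega,
        PySem.List.pyGetD_natCast]
    have hget2 : PySem.List.pyGetD t ((mid:Int) + ((k0:Int)+1) - 1) 0 = t.getD (mid + k0) 0 := by
      rw [show (mid:Int) + ((k0:Int)+1) - 1 = ((mid + k0 : Nat) : Int) by push_cast; ring,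
        PySem.List.pyGetD_natCast]
    have hls : seg t (mid - k0) k0 + PySem.List.pyGetD t ((mid:Int) - ((k0:Int)+1)) 0
        = seg t (mid - (k0+1)) (k0+1) := by
      rw [hget1, seg_succ_front t (mid - (k0+1)) k0 (by omega),
        show mid - (k0+1) + 1 = mid - k0 by omega]
      ring
    have hrs : seg t mid k0 + PySem.List.pyGetD t ((mid:Int) + ((k0:Int)+1) - 1) 0
        = seg t mid (k0+1) := by
      rw [hget2, seg_succ_back t mid k0 (by omega)]
    have hokot : (seg t (mid - (k0+1)) (k0+1) == seg t mid (k0+1)) = true ↔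
        okw t (mid - (k0+1)) (k0+1) := by
      rw [beq_iff_eq, okw, show mid - (k0+1) + (k0+1) = mid by omega]
    rw [hls, hrs]
    have harg1 : (k0:Int) + 1 + 1 = (((k0+1 : Nat)):Int) + 1 := by push_cast; ring
    have harg2 : (k0:Int) + ((d+1:Nat):Int) + 1 = (((k0+1 : Nat)):Int) + ((d:Nat):Int) + 1 := by
      push_cast; ring
    rw [harg1, harg2]
    set best' := if (seg t (mid - (k0+1)) (k0+1) == seg t mid (k0+1)) = true ∧
        2 * ((k0:Int)+1) > best then 2 * ((k0:Int)+1) else best with hbest'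
    have hmid1 : mid - (k0+1) = mid - (k0+1) := rfl
    have hstep : seg t (mid - (k0+1)) (k0+1) = seg t (mid - (k0+1)) (k0+1) := rfl
    obtain ⟨ihb, ih2, ih3⟩ := ih (k0+1) best' (by omega) (by omega)
    rw [show mid - (k0+1) = mid - (k0+1) from rfl] at ihb
    have hbb : best ≤ best' := by
      rw [hbest']; split
      · next hcond => omega
      · exact le_rfl
    refine ⟨le_trans hbb ihb, ?_, ?_⟩
    · intro k hk1 hk2 hok
      by_cases hk : k = k0 + 1
      · subst hk
        have h2k : 2 * ((k0:Int)+1) ≤ best' := by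
          rw [hbest']
          split
          · next hcond => omega
          · next hcond =>
            rw [not_and_or] at hcond
            rcases hcond with hcond | hcond
            · exact absurd (hokot.2 hok) hcond
            · omega
        calc 2 * ((k0+1 : Nat):Int) = 2 * ((k0:Int)+1) := by push_cast; ring
          _ ≤ best' := h2k
          _ ≤ _ := ihb
      · exact ih2 k (by omega) (by omega) hok
    · rcases ih3 with heq | ⟨k, hk1, hk2, hok, heq⟩
      · rw [heq, hbest']
        split
        · next hcond =>
          right
          exact ⟨k0+1, by omega, by omega, hokot.1 hcond.1, by push_cast; ring⟩
        · exact Or.inl rfl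
      · right
        exact ⟨k, by omega, by omega, hok, heq⟩

theorem outerB_inv (t : List Int) :
    ∀ (d m : Nat) (best : Int), m + d = t.length → 1 ≤ m →
    (best ≤ outerB t (t.length:Int) (PySem.List.pyRange (m:Int) (t.length:Int) 1) best ∧
     (∀ (mid k : Nat), m ≤ mid → mid + 1 ≤ t.length → 1 ≤ k → k ≤ mid → mid + k ≤ t.length →
        okw t (mid - k) k →
        2*(k:Int) ≤ outerB t (t.length:Int) (PySem.List.pyRange (m:Int) (t.length:Int) 1) best) ∧
     (outerB t (t.length:Int) (PySem.List.pyRange (m:Int) (t.length:Int) 1) best = best ∨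
      ∃ mid k : Nat, m ≤ mid ∧ mid + 1 ≤ t.length ∧ 1 ≤ k ∧ k ≤ mid ∧ mid + k ≤ t.length ∧
        okw t (mid - k) k ∧
        outerB t (t.length:Int) (PySem.List.pyRange (m:Int) (t.length:Int) 1) best = 2*(k:Int))) := by
  intro d
  induction d with
  | zero =>
    intro m best hmd hm1
    rw [PySem.List.pyRange_one_eq_nil (by omega), outerB]
    exact ⟨le_rfl, fun mid k hk1 hk2 _ _ _ _ => by omega, Or.inl rfl⟩
  | succ d ih =>
    intro m best hmd hm1
    rw [PySem.List.pyRange_one_cons (by omega), outerB]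
    have hinner := innerB_inv t m (min m (t.length - m)) 0 best (by omega) (by omega)
    rw [seg_zero, seg_zero,
      show ((0:Nat):Int) + 1 = (1:Int) by norm_num,
      show ((0:Nat):Int) + ((min m (t.length - m) : Nat):Int) + 1
          = min ((m:Nat):Int) ((t.length:Int) - ((m:Nat):Int)) + 1 by
        push_cast [Nat.cast_sub (show m ≤ t.length by omega)]
        omega] at hinner
    obtain ⟨ib, i2, i3⟩ := hinner
    obtain ⟨ob, o2, o3⟩ := ih (m+1)
      (innerB t (m:Int)
        (PySem.List.pyRange 1 (min ((m:Nat):Int) ((t.length:Int) - ((m:Nat):Int)) + 1) 1) 0 0 best)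
      (by omega) (by omega)
    rw [show (((m+1:Nat)):Int) = ((m:Nat):Int) + 1 by push_cast; ring] at ob o2 o3
    refine ⟨le_trans ib ob, ?_, ?_⟩
    · intro mid k h1 h2 h3 h4 h5 hok
      by_cases hmid : mid = m
      · subst hmid
        exact le_trans (i2 k (by omega) (by omega) hok) ob
      · exact o2 mid k (by omega) h2 h3 h4 h5 hok
    · rcases o3 with heq | ⟨mid, k, c1, c2, c3, c4, c5, hok, heq⟩
      · rw [heq]
        rcases i3 with he2 | ⟨k, hk1, hk2, hok, he2⟩
        · exact Or.inl he2
        · right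
          exact ⟨m, k, le_refl m, by omega, by omega, by omega, by omega, hok, he2⟩
      · right
        exact ⟨mid, k, by omega, c2, c3, c4, c5, hok, heq⟩

theorem charB (t : List Int) :
    (longest_lucky_number_alt t = 0 ∨ LuckyS t (longest_lucky_number_alt t)) ∧
    ∀ m, LuckyS t m → m ≤ longest_lucky_number_alt t := by
  have hdef : longest_lucky_number_alt t
      = outerB t (t.length:Int) (PySem.List.pyRange 1 (t.length:Int) 1) 0 := rfl
  rw [hdef]
  by_cases hn : t.length = 0
  · rw [hn, show ((0:Nat):Int) = (0:Int) by norm_num,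
      PySem.List.pyRange_one_eq_nil (by norm_num), outerB]
    refine ⟨Or.inl rfl, ?_⟩
    rintro m ⟨k, i, rfl, hk1, hwin, hok⟩
    omega
  · obtain ⟨ob, o2, o3⟩ := outerB_inv t (t.length - 1) 1 0 (by omega) (le_refl 1)
    rw [Nat.cast_one] at ob o2 o3
    constructor
    · rcases o3 with heq | ⟨mid, k, c1, c2, c3, c4, c5, hok, heq⟩
      · exact Or.inl heq
      · right
        exact ⟨k, mid - k, heq, c3, by omega, hok⟩
    · rintro m ⟨k, i, rfl, hk1, hwin, hok⟩
      refine o2 (i+k) k (by omega) (by omega) hk1 (by omega) (by omega) ?_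
      rw [show i + k - k = i by omega]
      exact hok

-- ===== VERDICT (by name: the statement is the Claim_ definition above) =====
theorem longest_lucky_number_spec : Claim_equal_longest_lucky_number := by
  intro t _
  unfold Spec_longest_lucky_number
  exact lucky_uniq t _ _ (charA t) (charB t)
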